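-- pv_equiv track=rewrite | github.com/rushiruhua17/Xliff-AI-Translation | core/token_safe_translation.py | reassemble_from_chunks
-- ===== SOURCE A (Python) =====
-- from typing import Dict, List, Optional, Set, Tuple
--
-- def reassemble_from_chunks(chunks: List[str], tokens: List[str]) -> str:
--     if len(chunks) != len(tokens) + 1:
--         raise ValueError("Reassemble invariant violated")
--     out: List[str] = []
--     for i, chunk in enumerate(chunks):
--         out.append(chunk or "")
--         if i < len(tokens):
--             out.append(tokens[i])
--     return "".join(out)
-- ===== SOURCE B (Python) =====
-- from typing import List
--
-- def reassemble_from_chunks(chunks: List[str], tokens: List[str]) -> str: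
--     if len(chunks) != len(tokens) + 1:
--         raise ValueError("Reassemble invariant violated")
--     out: List[str] = [""] * (len(chunks) + len(tokens))
--     out[0::2] = chunks
--     out[1::2] = tokens
--     return "".join(out)
-- ===== Notes on version B (the rewrite author's own statement) =====
-- stated objective: idiomatic
-- what changed: B builds a preallocated [""]*(2n+1) list and fills it positionally with two extended-slice assignments out[0::2]=chunks, out[1::2]=tokens (no Python-level interleaving loop), instead of A's enumerate loop that appends chunk-then-token conditionally.
import Mathlib
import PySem

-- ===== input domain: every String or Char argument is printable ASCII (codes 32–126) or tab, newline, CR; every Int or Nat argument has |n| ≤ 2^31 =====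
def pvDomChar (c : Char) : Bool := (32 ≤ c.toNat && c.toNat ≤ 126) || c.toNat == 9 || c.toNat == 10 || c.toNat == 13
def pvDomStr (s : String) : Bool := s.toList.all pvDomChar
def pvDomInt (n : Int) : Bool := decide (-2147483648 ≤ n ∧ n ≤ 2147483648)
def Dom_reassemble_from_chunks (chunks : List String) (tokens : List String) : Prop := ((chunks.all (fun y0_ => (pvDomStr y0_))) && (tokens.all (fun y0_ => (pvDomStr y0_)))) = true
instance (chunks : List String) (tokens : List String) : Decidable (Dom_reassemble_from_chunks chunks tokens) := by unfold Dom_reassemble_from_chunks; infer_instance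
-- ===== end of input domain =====

-- B replaces A's interleaving loop by a preallocated list filled positionally via two
-- extended-slice assignments (out[0::2]=chunks, out[1::2]=tokens); same cost, idiomatic, no loop.

-- ===== PORT A =====
-- 'chunk or ""' on a string is 'if chunk == "" then "" else chunk'
def reassemble_from_chunks (chunks : List String) (tokens : List String) : String :=
  if chunks.length ≠ tokens.length + 1 then "" else  -- Python raises ValueError here; excluded by Pre_
    let out : List String :=
      (PySem.List.enumerate chunks).foldl
        (fun acc p =>
          let acc := acc ++ [if p.2 == "" then "" else p.2]
          if p.1 < (tokens.length : Int) then acc ++ [PySem.List.pyGetD tokens p.1 ""] else acc)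
        []
    PySem.Str.join "" out

-- ===== PORT B =====
-- out = [""]*(len(chunks)+len(tokens)); out[0::2]=chunks; out[1::2]=tokens.
-- The two strided slice assignments (lengths match exactly, checked by Python) put chunks[k]
-- at position 2k and tokens[k] at position 2k+1; position i therefore holds
-- chunks[i/2] when i is even and tokens[i/2] when i is odd — always in range, so getD is exact.
def reassemble_from_chunks_alt (chunks : List String) (tokens : List String) : String :=
  if chunks.length ≠ tokens.length + 1 then "" else  -- Python raises ValueError here; excluded by Pre_
    let out : List String :=
      (List.range (chunks.length + tokens.length)).map
        (fun i => if i % 2 = 0 then chunks.getD (i / 2) "" else tokens.getD (i / 2) "")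
    PySem.Str.join "" out

-- ===== PRECONDITION & SPEC =====
-- Pre_ excludes exactly the inputs where A raises ValueError (length invariant violated).
def Pre_reassemble_from_chunks (chunks : List String) (tokens : List String) : Prop :=
  chunks.length = tokens.length + 1
instance (chunks : List String) (tokens : List String) : Decidable (Pre_reassemble_from_chunks chunks tokens) := by unfold Pre_reassemble_from_chunks; infer_instance
def pvWitness_reassemble_from_chunks : List String × List String := (["a", "b"], ["X"])

def Spec_reassemble_from_chunks (chunks : List String) (tokens : List String) (out : String) : Prop := out = reassemble_from_chunks_alt chunks tokens
instance (chunks : List String) (tokens : List String) (out : String) : Decidable (Spec_reassemble_from_chunks chunks tokens out) := by unfold Spec_reassemble_from_chunks; infer_instance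

-- ===== CLAIM (what is proved, stated in full; the proofs are below) =====
def Claim_equal_reassemble_from_chunks : Prop := ∀ (chunks : List String) (tokens : List String), Dom_reassemble_from_chunks chunks tokens → Pre_reassemble_from_chunks chunks tokens → Spec_reassemble_from_chunks chunks tokens (reassemble_from_chunks chunks tokens)

-- ===== LEMMAS AND PROOFS =====

-- A's loop body, abstracted over the token list it indexes.
def pvStepA (tokens : List String) (acc : List String) (p : Int × String) : List String :=
  let acc := acc ++ [if p.2 == "" then "" else p.2]
  if p.1 < (tokens.length : Int) then acc ++ [PySem.List.pyGetD tokens p.1 ""] else acc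

-- The interleaving both programs produce: chunk, token, chunk, token, …, last chunk alone.
def pvMix (ts cs : List String) : List String :=
  match cs with
  | [] => []
  | c :: cs' =>
    c ::
      (match ts with
       | [] => []
       | t :: ts' => t :: pvMix ts' cs')

lemma pvMix_length : ∀ (ts cs : List String), cs.length = ts.length + 1 →
    (pvMix ts cs).length = 2 * ts.length + 1 := by
  intro ts
  induction ts with
  | nil => intro cs h; match cs, h with | [c], _ => simp [pvMix]
  | cons t ts' ih =>
    intro cs h
    match cs with
    | c :: cs' =>
      have h' : cs'.length = ts'.length + 1 := by simpa using h
      simp [pvMix, ih cs' h']; omega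

lemma pvMix_getD : ∀ (ts cs : List String), cs.length = ts.length + 1 →
    ∀ i, i < 2 * ts.length + 1 →
    (pvMix ts cs).getD i "" = if i % 2 = 0 then cs.getD (i / 2) "" else ts.getD (i / 2) "" := by
  intro ts
  induction ts with
  | nil =>
    intro cs h i hi
    match cs, h with
    | [c], _ =>
      match i with
      | 0 => simp [pvMix]
  | cons t ts' ih =>
    intro cs h i hi
    match cs with
    | c :: cs' =>
      have h' : cs'.length = ts'.length + 1 := by simpa using h
      match i with
      | 0 => simp [pvMix]
      | 1 => simp [pvMix]
      | (j + 2) =>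
        have hj : j < 2 * ts'.length + 1 := by simp at hi; omega
        have hmod : (j + 2) % 2 = j % 2 := by omega
        have hdiv : (j + 2) / 2 = j / 2 + 1 := by omega
        have : (pvMix (t :: ts') (c :: cs')).getD (j + 2) "" = (pvMix ts' cs').getD j "" := by
          simp [pvMix]
        rw [this, ih cs' h' j hj, hmod, hdiv]
        simp

-- A's fold over enumerate, from any start index s, produces the interleaving of the
-- remaining tokens with the remaining chunks.
lemma pvFoldA (tokens : List String) :
    ∀ (cs : List String) (s : Nat) (acc : List String),
      s + cs.length = tokens.length + 1 →
      (PySem.List.enumerate cs (s : Int)).foldl (pvStepA tokens) acc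
        = acc ++ pvMix (tokens.drop s) cs := by
  intro cs
  induction cs with
  | nil => intro s acc _; simp [PySem.List.enumerate_nil, pvMix]
  | cons c cs' ih =>
    intro s acc h
    simp only [List.length_cons] at h
    rw [PySem.List.enumerate_cons]
    simp only [List.foldl_cons]
    have hslen : s ≤ tokens.length := by omega
    by_cases hlast : s = tokens.length
    · -- last chunk: no token appended, cs' = []
      have hcs' : cs' = [] := by
        cases cs' with
        | nil => rfl
        | cons _ _ =>
          exfalso; rw [hlast] at h
          simp only [List.length_cons] at h
          omega
      subst hcs'
      simp [pvStepA, pvMix, hlast, PySem.List.enumerate_nil, List.drop_eq_nil_of_le]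
    · have hlt : s < tokens.length := lt_of_le_of_ne hslen hlast
      have hdrop : tokens.drop s = tokens[s] :: tokens.drop (s + 1) :=
        List.drop_eq_getElem_cons hlt
      have hstep : pvStepA tokens acc ((s : Int), c)
          = acc ++ [c] ++ [tokens[s]] := by
        simp [pvStepA, hlt, PySem.List.pyGetD_ofNat tokens s _ hlt]
      have hrec := ih (s + 1) (pvStepA tokens acc ((s : Int), c)) (by omega)
      have hcast : ((s : Int) + 1) = ((s + 1 : Nat) : Int) := by push_cast; ring
      rw [hcast, hrec, hstep, hdrop]
      cases cs' with
      | nil => simp only [List.length_nil] at h; omega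
      | cons c' cs'' => simp only [pvMix, List.append_assoc]; simp

-- B's range-map equals the same interleaving.
lemma pvMapB (chunks tokens : List String) (h : chunks.length = tokens.length + 1) :
    (List.range (chunks.length + tokens.length)).map
        (fun i => if i % 2 = 0 then chunks.getD (i / 2) "" else tokens.getD (i / 2) "")
      = pvMix tokens chunks := by
  have hlen : chunks.length + tokens.length = 2 * tokens.length + 1 := by omega
  apply List.ext_getElem
  · simp [pvMix_length tokens chunks h, hlen]
  · intro i h1 h2
    have hi : i < 2 * tokens.length + 1 := by
      simp only [List.length_map, List.length_range] at h1
      omega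
    have := pvMix_getD tokens chunks h i hi
    have hg : (pvMix tokens chunks)[i] = (pvMix tokens chunks).getD i "" := by
      rw [List.getD_eq_getElem _ _ h2]
    simp only [List.getElem_map, List.getElem_range]
    rw [hg, this]

theorem reassemble_from_chunks_spec : Claim_equal_reassemble_from_chunks := by
  unfold Claim_equal_reassemble_from_chunks
  intro chunks tokens _ hpre
  unfold Spec_reassemble_from_chunks reassemble_from_chunks reassemble_from_chunks_alt
  unfold Pre_reassemble_from_chunks at hpre
  simp only [hpre, ne_eq, not_true_eq_false, if_false]
  congr 1
  have hA : (PySem.List.enumerate chunks 0).foldl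
      (fun acc p =>
        let acc := acc ++ [if p.2 == "" then "" else p.2]
        if p.1 < (tokens.length : Int) then acc ++ [PySem.List.pyGetD tokens p.1 ""] else acc) []
      = (PySem.List.enumerate chunks ((0 : Nat) : Int)).foldl (pvStepA tokens) [] := rfl
  rw [hA, pvFoldA tokens chunks 0 [] (by omega)]
  have hB := pvMapB chunks tokens hpre
  rw [hpre] at hB
  rw [hB]
  simp
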